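-- pv_equiv track=rewrite | github.com/ant-louis/blockchain-key-value-store | code/keychain/node.py | get_address_best_hash
-- ===== SOURCE A (Python) =====
-- import operator
--
-- def get_address_best_hash(hashes):
--     results = {}
--     for hash in hashes.values():
--         if(hash in results):
--             results[hash] += 1
--         else:
--             results[hash] = 1
--
--     best_hash = max(results.items(), key=operator.itemgetter(1))[0]
--     for address,hash in hashes.items():
--         if(best_hash == hash):
--             return address
--     return None
-- ===== SOURCE B (Python) =====
-- def get_address_best_hash(hashes):
--     groups = {}
--     for address, hash in hashes.items():
--         groups.setdefault(hash, []).append(address)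
--     best_group = max(groups.values(), key=len)
--     return best_group[0]
-- ===== Notes on version B (the rewrite author's own statement) =====
-- stated objective: alternative
-- what changed: B replaces A's count dict plus a second full scan of the dict with a single grouping pass (hash -> list of addresses) and returns the head of the longest group, relying on dict insertion order for A's tie-breaking.
import Mathlib
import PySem

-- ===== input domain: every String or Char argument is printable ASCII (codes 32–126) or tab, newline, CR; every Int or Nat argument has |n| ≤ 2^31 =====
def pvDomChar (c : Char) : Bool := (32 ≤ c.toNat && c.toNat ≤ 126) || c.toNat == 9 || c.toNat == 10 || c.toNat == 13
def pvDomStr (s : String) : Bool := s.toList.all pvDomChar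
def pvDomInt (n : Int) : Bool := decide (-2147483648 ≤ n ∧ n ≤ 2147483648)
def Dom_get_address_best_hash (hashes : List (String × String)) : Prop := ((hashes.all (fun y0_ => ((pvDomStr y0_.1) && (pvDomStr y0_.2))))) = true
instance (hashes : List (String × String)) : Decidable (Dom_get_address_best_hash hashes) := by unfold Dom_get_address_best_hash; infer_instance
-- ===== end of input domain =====

-- B groups addresses by hash in one pass and returns the head of the longest group
-- (first-extremal, matching dict insertion order); same O(n) cost, different decomposition.

-- ===== PORT A =====
-- the final 'for address,hash in hashes.items(): if best_hash == hash: return address' loop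
def findAddrA (best : String) : List (String × String) → Option String
  | [] => none
  | (address, hash) :: t => if best == hash then some address else findAddrA best t

def get_address_best_hash (hashes : List (String × String)) : Option String :=
  let d := PySem.Dict.ofList hashes
  let results := d.values.foldl
    (fun r hash => if r.contains hash then r.modify hash 0 (· + 1) else r.insert hash 1)
    (PySem.Dict.empty : PySem.Dict String Int)   -- Python ints are Int
  match PySem.List.max? results.items (fun p => p.2) with
  | none => none        -- max([]) raises ValueError in Python; excluded by Pre_
  | some best => findAddrA best.1 d.items

-- ===== PORT B =====
def get_address_best_hash_alt (hashes : List (String × String)) : Option String :=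
  let d := PySem.Dict.ofList hashes
  let groups := d.items.foldl
    (fun g p => g.modify p.2 [] (fun l => l ++ [p.1]))   -- groups.setdefault(hash, []).append(address)
    PySem.Dict.empty
  match PySem.List.max? groups.values (fun l => (l.length : Int)) with
  | none => none        -- max([]) raises ValueError in Python; excluded by Pre_
  | some best => PySem.List.pyGet? best 0   -- best_group[0]

-- ===== PRECONDITION & SPEC =====
-- On an empty dict both Pythons raise ValueError (max of an empty sequence); Pre_ excludes exactly that input.
def Pre_get_address_best_hash (hashes : List (String × String)) : Prop := hashes ≠ []
instance (hashes : List (String × String)) : Decidable (Pre_get_address_best_hash hashes) := by unfold Pre_get_address_best_hash; infer_instance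
def pvWitness_get_address_best_hash : (List (String × String)) := [("addr1", "h1")]

def Spec_get_address_best_hash (hashes : List (String × String)) (out : Option String) : Prop := out = get_address_best_hash_alt hashes
instance (hashes : List (String × String)) (out : Option String) : Decidable (Spec_get_address_best_hash hashes out) := by unfold Spec_get_address_best_hash; infer_instance

-- ===== CLAIM (what is proved, stated in full; the proofs are below) =====
def Claim_equal_get_address_best_hash : Prop := ∀ (hashes : List (String × String)), Dom_get_address_best_hash hashes → Pre_get_address_best_hash hashes → Spec_get_address_best_hash hashes (get_address_best_hash hashes)

-- ===== LEMMAS AND PROOFS =====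

-- A's counting loop is Counter(values)
theorem countStep_eq :
    (fun (r : PySem.Dict String Int) (h : String) =>
      if r.contains h then r.modify h 0 (· + 1) else r.insert h 1)
    = fun r h => r.modify h 0 (· + 1) := by
  funext r h
  by_cases hc : r.contains h
  · simp [hc]
  · simp only [Bool.not_eq_true] at hc
    simp [hc, PySem.Dict.modify, PySem.Dict.getD_of_not_contains _ _ hc]

-- both max? folds, over lists that are maps of the same list S with pointwise-equal keys,
-- pick out the image of the same reference fold over S
def pickStep {α : Type} (key : α → Int) (acc : Option α) (x : α) : Option α :=
  match acc with | none => some x | some m => if key m < key x then some x else some m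

theorem foldl_max_map {α β : Type} (k1 : β → Int) (f : α → β) (key : α → Int) :
    ∀ (S : List α) (acc : Option α), (∀ x ∈ S, k1 (f x) = key x) → (∀ a, acc = some a → k1 (f a) = key a) →
    List.foldl (fun acc x => match acc with | none => some x | some m => if k1 m < k1 x then some x else some m)
        (acc.map f) (S.map f)
      = (List.foldl (pickStep key) acc S).map f := by
  intro S
  induction S with
  | nil => intro acc _ _; simp
  | cons x t ih =>
    intro acc hS hacc
    have hx : k1 (f x) = key x := hS x (by simp)
    cases acc with
    | none =>
      simpa [pickStep] using ih (some x) (fun y hy => hS y (by simp [hy]))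
        (by rintro a rfl0; simp at rfl0; subst rfl0; exact hx)
    | some a =>
      have ha : k1 (f a) = key a := hacc a rfl
      simp only [List.map_cons, List.foldl_cons, Option.map_some, pickStep, ha, hx]
      by_cases hlt : key a < key x
      · simp only [if_pos hlt]
        exact ih (some x) (fun y hy => hS y (by simp [hy]))
          (by rintro b hb; simp at hb; subst hb; exact hx)
      · simp only [if_neg hlt]
        exact ih (some a) (fun y hy => hS y (by simp [hy]))
          (by rintro b hb; simp at hb; subst hb; exact ha)

theorem max?_map {α β : Type} (k1 : β → Int) (f : α → β) (key : α → Int) (S : List α)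
    (h : ∀ x ∈ S, k1 (f x) = key x) :
    PySem.List.max? (S.map f) k1 = (List.foldl (pickStep key) none S).map f := by
  have := foldl_max_map k1 f key S none h (by simp)
  simpa [PySem.List.max?] using this

-- A's final scan is the head of the address group of the best hash
theorem findAddrA_eq (b : String) (l : List (String × String)) :
    findAddrA b l = ((l.filter (fun p => p.2 == b)).map Prod.fst).head? := by
  induction l with
  | nil => rfl
  | cons p t ih =>
    obtain ⟨a, h⟩ := p
    by_cases hb : b = h
    · simp [findAddrA, hb]
    · simp [findAddrA, hb, Ne.symm hb, ih]

theorem pyGet?_zero {α : Type} (xs : List α) : PySem.List.pyGet? xs 0 = xs.head? := by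
  cases xs with
  | nil => simp [PySem.List.pyGet?, PySem.List.pyIdx?]
  | cons x t => simp [PySem.List.pyGet?, PySem.List.pyIdx?]

theorem count_snd_eq_length_filter (items : List (String × String)) (h : String) :
    List.count h (items.map Prod.snd) = (items.filter (fun p => p.2 == h)).length := by
  simp [List.count, List.countP_eq_length_filter, List.filter_map, Function.comp_def]

-- the two ports agree for an arbitrary items list (the lets of the ports zeta-reduce onto this)
theorem ports_core (items : List (String × String)) :
    (match PySem.List.max?
        (((items.map Prod.snd).foldl
          (fun r hash => if r.contains hash then r.modify hash 0 (· + 1) else r.insert hash 1)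
          (PySem.Dict.empty : PySem.Dict String Int)).items) (fun p => p.2) with
      | none => (none : Option String)
      | some best => findAddrA best.1 items)
    = (match PySem.List.max?
        ((items.foldl (fun g p => g.modify p.2 [] (fun l => l ++ [p.1])) PySem.Dict.empty).values)
        (fun l => (l.length : Int)) with
      | none => none
      | some best => PySem.List.pyGet? best 0) := by
  set S : List String := PySem.Set.ofList (items.map Prod.snd) with hS
  set key : String → Int := fun h => (List.count h (items.map Prod.snd) : Int) with hkey
  set R : Option String := List.foldl (pickStep key) none S with hR
  set grp : String → List String := fun h => (items.filter (fun p => p.2 == h)).map Prod.fst with hgrp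
  -- A side
  have hresults : (items.map Prod.snd).foldl
      (fun r h => if r.contains h then r.modify h 0 (· + 1) else r.insert h 1) (PySem.Dict.empty : PySem.Dict String Int)
      = PySem.Dict.counter (items.map Prod.snd) := by
    rw [countStep_eq]; rfl
  have hAitems : (PySem.Dict.counter (items.map Prod.snd)).items
      = S.map (fun k => (k, (List.count k (items.map Prod.snd) : Int))) :=
    PySem.Dict.items_counter _
  have hAmax : PySem.List.max? (S.map (fun k => (k, (List.count k (items.map Prod.snd) : Int)))) (fun p => p.2)
      = R.map (fun k => (k, (List.count k (items.map Prod.snd) : Int))) := by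
    rw [hR]
    exact max?_map (fun p => p.2) (fun k => (k, (List.count k (items.map Prod.snd) : Int))) key S (fun x _ => rfl)
  -- B side
  set groups := items.foldl (fun g p => g.modify p.2 [] (fun l => l ++ [p.1])) PySem.Dict.empty with hgroups
  have hkeys : groups.keys = S := by
    rw [hgroups,
      PySem.Dict.keys_foldl_modify_key items Prod.snd [] (fun _ p => fun l => l ++ [p.1]) PySem.Dict.empty]
    rfl
  have hnodup : groups.keys.Nodup := by
    rw [hgroups]
    exact PySem.Dict.nodup_keys_foldl_modify_key items Prod.snd [] _ _ PySem.Dict.nodup_keys_empty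
  have hgetD : ∀ h, groups.getD h [] = grp h := by
    intro h
    have hswap : groups = (items.map (fun p => (p.2, p.1))).foldl
        (fun g q => g.modify q.1 [] (fun l => l ++ [q.2])) PySem.Dict.empty := by
      rw [hgroups, List.foldl_map]
    rw [hswap, PySem.Dict.getD_foldl_modify_append]
    simp [hgrp, List.filter_map, Function.comp_def]
  have hBvals : groups.values = S.map grp := by
    rw [PySem.Dict.values_eq_map_keys groups hnodup [], hkeys]
    exact List.map_congr_left (fun h _ => hgetD h)
  have hBmax : PySem.List.max? (S.map grp) (fun l => (l.length : Int)) = R.map grp := by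
    rw [hR]
    refine max?_map (fun l => (l.length : Int)) grp key S (fun x _ => ?_)
    simp [hgrp, hkey, count_snd_eq_length_filter]
  simp only [hresults, hAitems, hAmax, hBvals, hBmax]
  cases R with
  | none => rfl
  | some h =>
    simp only [Option.map_some]
    rw [pyGet?_zero, findAddrA_eq]

-- ===== VERDICT (by name: the statement is the Claim_ definition above) =====
theorem get_address_best_hash_spec : Claim_equal_get_address_best_hash := by
  intro hashes _ _
  unfold Spec_get_address_best_hash get_address_best_hash get_address_best_hash_alt
  exact ports_core (PySem.Dict.ofList hashes).items
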